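-- pv_equiv track=rewrite | github.com/PremierLangage/Yggdrasil | ComputerScience/Automates-ClaireDavid/scripts/FAdo/common.py | overlapFreeP
-- ===== SOURCE A (Python) =====
-- def overlapFreeP(word):
--     """
--     Returns True if word is overlap free, i.e, no  proper  and nonempty
--      prefix  is a suffix
--
--     :param word: the word
--     :rtype: Boolean
--     """
--     l = len(word)
--     for i in range(l-1):
--         foo = True
--         for j in range(i+1):
--             if word[j] != word[-(i+1)+j]:
--                 foo = False
--                 break
--         if foo:
--             return False
--     return True
-- ===== SOURCE B (Python) =====
-- def overlapFreeP(word):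
--     """KMP failure function: the word has a border iff fail[n-1] > 0. O(n) vs A's O(n^2)."""
--     n = len(word)
--     if n < 2:
--         return True
--     fail = [0] * n
--     for i in range(1, n):
--         k = fail[i - 1]
--         while k > 0 and word[i] != word[k]:
--             k = fail[k - 1]
--         if word[i] == word[k]:
--             k += 1
--         fail[i] = k
--     return fail[n - 1] == 0
-- ===== Notes on version B (the rewrite author's own statement) =====
-- stated objective: faster
-- what changed: Replaces A's quadratic scan that compares every prefix length against the corresponding suffix character by character with the KMP failure-function computation: the word has a border iff the failure value of its last position is positive.
import Mathlib
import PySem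

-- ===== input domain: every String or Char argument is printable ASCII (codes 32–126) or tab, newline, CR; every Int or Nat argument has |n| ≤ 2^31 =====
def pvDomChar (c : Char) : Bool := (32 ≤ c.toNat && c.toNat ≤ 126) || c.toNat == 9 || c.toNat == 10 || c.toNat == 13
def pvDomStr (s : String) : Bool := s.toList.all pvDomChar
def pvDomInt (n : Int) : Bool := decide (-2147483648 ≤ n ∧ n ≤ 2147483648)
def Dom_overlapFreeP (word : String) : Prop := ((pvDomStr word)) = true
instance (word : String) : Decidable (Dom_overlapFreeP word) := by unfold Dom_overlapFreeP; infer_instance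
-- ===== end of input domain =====

-- B replaces A's quadratic all-border scan by the KMP failure function (linear time).

-- ===== PORT A =====
-- inner loop: 'for j in range(i+1): if word[j] != word[-(i+1)+j]: foo = False; break'
-- (for 0 ≤ i ≤ l-2 both Python indices are in range, so getD is exact here;
--  the negative index -(i+1)+j is the in-range position l-(i+1)+j)
def aInner (w : List Char) (i : Nat) : Bool :=
  (List.range (i+1)).all (fun j => w.getD j default == w.getD (w.length - (i+1) + j) default)

-- outer loop with the early 'return False'
def aOuter (w : List Char) : List Nat → Bool
  | [] => true
  | i :: rest => if aInner w i then false else aOuter w rest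

def overlapFreeP (word : String) : Bool :=
  let w := word.toList
  aOuter w (List.range (w.length - 1))

-- ===== PORT B =====
-- 'while k > 0 and word[i] != word[k]: k = fail[k-1]'; fuel = initial k is enough,
-- since each step strictly decreases k (fail[k-1] ≤ k-1 on every real run)
def kmpFall (w : List Char) (fail : List Nat) (c : Char) : Nat → Nat → Nat
  | 0, k => k
  | fuel+1, k =>
    if 0 < k ∧ ¬ (w.getD k default == c) then
      kmpFall w fail c fuel (fail.getD (k-1) 0)
    else k

-- one iteration of 'for i in range(1, n)'; 'fail[i] = k' becomes appending the new entry
def kmpStep (w : List Char) (fail : List Nat) (i : Nat) : List Nat :=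
  let c := w.getD i default
  let k0 := fail.getD (i-1) 0
  let k1 := kmpFall w fail c k0 k0
  let k2 := if w.getD k1 default = c then k1 + 1 else k1
  fail ++ [k2]

def overlapFreeP_alt (word : String) : Bool :=
  let w := word.toList
  let n := w.length
  if n < 2 then true
  else
    let fail := (List.range' 1 (n-1)).foldl (kmpStep w) [0]
    decide (fail.getD (n-1) 0 = 0)

-- ===== PRECONDITION & SPEC =====
def Spec_overlapFreeP (word : String) (out : Bool) : Prop := out = overlapFreeP_alt word
instance (word : String) (out : Bool) : Decidable (Spec_overlapFreeP word out) := by unfold Spec_overlapFreeP; infer_instance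

-- ===== CLAIM (what is proved, stated in full; the proofs are below) =====
def Claim_equal_overlapFreeP : Prop := ∀ (word : String), Dom_overlapFreeP word → Spec_overlapFreeP word (overlapFreeP word)

-- ===== LEMMAS AND PROOFS =====

-- k is a border length of p: proper prefix of length k equals suffix of length k (k = 0 allowed)
def isBorder (p : List Char) (k : Nat) : Prop :=
  k < p.length ∧ p.take k = p.drop (p.length - k)

-- length of the longest border of p
def mb (p : List Char) : Nat :=
  Nat.findGreatest (fun k => p.take k = p.drop (p.length - k)) (p.length - 1)

theorem mb_le (p : List Char) : mb p ≤ p.length - 1 := Nat.findGreatest_le _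

theorem mb_border (p : List Char) (hp : p ≠ []) : isBorder p (mb p) := by
  have h0 : p.take 0 = p.drop (p.length - 0) := by simp
  have hs := Nat.findGreatest_spec (P := fun k => p.take k = p.drop (p.length - k))
      (n := p.length - 1) (Nat.zero_le _) h0
  refine ⟨?_, hs⟩
  have := mb_le p
  have hlen : 0 < p.length := List.length_pos_iff.mpr hp
  omega

theorem mb_ge (p : List Char) (k : Nat) (h : isBorder p k) : k ≤ mb p := by
  obtain ⟨hk, heq⟩ := h
  exact Nat.le_findGreatest (by omega) heq

theorem border_border (p : List Char) (b j : Nat) (hb : isBorder p b) (hj : j < b) :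
    (isBorder p j ↔ isBorder (p.take b) j) := by
  obtain ⟨hbl, hbe⟩ := hb
  have hlen : (p.take b).length = b := by simp; omega
  have htake : (p.take b).take j = p.take j := by
    rw [List.take_take]; congr 1; omega
  have hdrop : (p.take b).drop (b - j) = p.drop (p.length - j) := by
    rw [hbe, List.drop_drop]
    congr 1; omega
  constructor
  · rintro ⟨_, he⟩
    exact ⟨by omega, by rw [hlen, htake, hdrop, he]⟩
  · rintro ⟨_, he⟩
    rw [hlen, htake, hdrop] at he
    exact ⟨by omega, he⟩

theorem border_snoc (p : List Char) (c : Char) (j : Nat) (hj : j < p.length) :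
    (isBorder (p ++ [c]) (j+1) ↔ isBorder p j ∧ p.getD j default = c) := by
  have hlen : (p ++ [c]).length = p.length + 1 := by simp
  have htake : (p ++ [c]).take (j+1) = p.take j ++ [p[j]] := by
    rw [List.take_append_of_le_length (by omega), List.take_add_one]
    simp [List.getElem?_eq_getElem hj]
  have hdrop : (p ++ [c]).drop (p.length + 1 - (j+1)) = p.drop (p.length - j) ++ [c] := by
    have : p.length + 1 - (j+1) = p.length - j := by omega
    rw [this, List.drop_append_of_le_length (by omega)]
  have hlt : j < p.length := hj
  have hltake : (p.take j).length = j := by simp; omega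
  have hldrop : (p.drop (p.length - j)).length = j := by simp; omega
  constructor
  · rintro ⟨_, he⟩
    rw [hlen, htake, hdrop] at he
    have := List.append_inj he (by omega)
    obtain ⟨h1, h2⟩ := this
    refine ⟨⟨hj, h1⟩, ?_⟩
    have : p[j] = c := by simpa using h2
    rw [List.getD_eq_getElem p default hj, this]
  · rintro ⟨⟨_, he⟩, hc⟩
    refine ⟨by omega, ?_⟩
    rw [hlen, htake, hdrop, he]
    congr 1
    rw [← hc, List.getD_eq_getElem p default hj]

-- the fallback loop: its result is a border followed by a matching char (or 0), and
-- it dominates every border whose next character matches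
theorem fall_spec (w : List Char) (fail : List Nat) (i : Nat)
    (_hi1 : 1 ≤ i) (hiw : i < w.length)
    (Hf : ∀ t, t < i → fail.getD t 0 = mb (w.take (t+1))) (c : Char) :
    ∀ fuel k, k ≤ fuel → isBorder (w.take i) k →
      (isBorder (w.take i) (kmpFall w fail c fuel k) ∧
       (kmpFall w fail c fuel k = 0 ∨ w.getD (kmpFall w fail c fuel k) default = c) ∧
       (∀ j, j ≤ k → isBorder (w.take i) j → w.getD j default = c → j ≤ kmpFall w fail c fuel k)) := by
  have hplen : (w.take i).length = i := by simp; omega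
  intro fuel
  induction fuel with
  | zero =>
    intro k hk hb
    have hk0 : k = 0 := by omega
    subst hk0
    exact ⟨by simpa [kmpFall] using hb, by simp [kmpFall],
      fun j hj _ _ => by simpa [kmpFall] using hj⟩
  | succ fuel ih =>
    intro k hk hb
    simp only [kmpFall]
    by_cases hcond : 0 < k ∧ ¬ (w.getD k default == c)
    · simp only [if_pos hcond]
      obtain ⟨hkpos, hne⟩ := hcond
      have hne' : w.getD k default ≠ c := by simpa using hne
      have hklt : k < i := by have := hb.1; omega
      have hq : w.take k = (w.take i).take k := by
        rw [List.take_take]; congr 1; omega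
      have hfk : fail.getD (k-1) 0 = mb ((w.take i).take k) := by
        have h1 := Hf (k-1) (by omega)
        have h2 : k - 1 + 1 = k := by omega
        rw [h1, h2, hq]
      have hqne : (w.take i).take k ≠ [] := by
        have : ((w.take i).take k).length = k := by simp; omega
        intro h; rw [h] at this; simp at this; omega
      have hqb := mb_border _ hqne
      have hqlen : ((w.take i).take k).length = k := by simp; omega
      have hmlt : mb ((w.take i).take k) < k := by
        have := mb_le ((w.take i).take k)
        rw [hqlen] at this; omega
      have hbp : isBorder (w.take i) (mb ((w.take i).take k)) :=
        (border_border (w.take i) k _ hb hmlt).mpr hqb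
      have hfuel : mb ((w.take i).take k) ≤ fuel := by omega
      obtain ⟨r1, r2, r3⟩ := ih (fail.getD (k-1) 0) (by rw [hfk]; omega) (by rw [hfk]; exact hbp)
      refine ⟨r1, r2, ?_⟩
      intro j hj hbj hcj
      rcases Nat.lt_or_ge j k with hjk | hjk
      · have hbqj : isBorder ((w.take i).take k) j := (border_border (w.take i) k j hb hjk).mp hbj
        have hjle : j ≤ mb ((w.take i).take k) := mb_ge _ j hbqj
        exact r3 j (by rw [hfk]; omega) hbj hcj
      · have : j = k := by omega
        subst this
        exact absurd hcj hne'
    · simp only [if_neg hcond]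
      push_neg at hcond
      refine ⟨hb, ?_, fun j hj _ _ => hj⟩
      by_cases hk0 : k = 0
      · exact Or.inl hk0
      · have := hcond (by omega)
        exact Or.inr (by simpa using this)

-- one KMP iteration computes the longest border of the next prefix
theorem step_spec (w : List Char) (fail : List Nat) (i : Nat)
    (hi1 : 1 ≤ i) (hiw : i < w.length)
    (Hf : ∀ t, t < i → fail.getD t 0 = mb (w.take (t+1))) :
    kmpStep w fail i = fail ++ [mb (w.take (i+1))] := by
  have hplen : (w.take i).length = i := by simp; omega
  have hpne : w.take i ≠ [] := by
    intro h; rw [h] at hplen; simp at hplen; omega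
  set c := w.getD i default with hc
  have hk0 : fail.getD (i-1) 0 = mb (w.take i) := by
    have h1 := Hf (i-1) (by omega)
    have h2 : i - 1 + 1 = i := by omega
    rw [h1, h2]
  have hb0 : isBorder (w.take i) (mb (w.take i)) := mb_border _ hpne
  obtain ⟨r1, r2, r3⟩ := fall_spec w fail i hi1 hiw Hf c (fail.getD (i-1) 0) (fail.getD (i-1) 0)
      le_rfl (by rw [hk0]; exact hb0)
  set k1 := kmpFall w fail c (fail.getD (i-1) 0) (fail.getD (i-1) 0) with hk1
  -- take (i+1) w = take i w ++ [w[i]]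
  have hsnoc : w.take (i+1) = w.take i ++ [c] := by
    rw [hc, List.getD_eq_getElem w default hiw, List.take_add_one]
    simp [List.getElem?_eq_getElem hiw]
  have hgetp : ∀ j, j < i → (w.take i).getD j default = w.getD j default := by
    intro j hj
    have hjw : j < w.length := by omega
    rw [List.getD_eq_getElem _ default (by omega), List.getD_eq_getElem w default hjw]
    simp
  have hk1lt : k1 < i := by have := r1.1; omega
  have hkey : (if w.getD k1 default = c then k1 + 1 else k1) = mb (w.take (i+1)) := by
    apply Nat.le_antisymm
    · by_cases hm : w.getD k1 default = c
      · rw [if_pos hm]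
        apply mb_ge
        rw [hsnoc]
        refine (border_snoc (w.take i) c k1 (by omega)).mpr ⟨r1, ?_⟩
        rw [hgetp k1 hk1lt, hm]
      · rw [if_neg hm]
        rcases r2 with h0 | hmm
        · rw [h0]; exact Nat.zero_le _
        · exact absurd hmm hm
    · have hne1 : w.take (i+1) ≠ [] := by
        rw [hsnoc]; simp
      have hmbb := mb_border (w.take (i+1)) hne1
      rcases Nat.eq_zero_or_pos (mb (w.take (i+1))) with h0 | hpos
      · rw [h0]; exact Nat.zero_le _
      · obtain ⟨j, hj⟩ : ∃ j, mb (w.take (i+1)) = j + 1 := ⟨mb (w.take (i+1)) - 1, by omega⟩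
        rw [hj] at hmbb
        rw [hsnoc] at hmbb
        have hjlt : j < (w.take i).length := by
          have := hmbb.1; simp at this ⊢; omega
        obtain ⟨hbj, hcj⟩ := (border_snoc (w.take i) c j hjlt).mp hmbb
        have hcj' : w.getD j default = c := by rw [← hgetp j (by omega)]; exact hcj
        have hjk0 : j ≤ fail.getD (i-1) 0 := by rw [hk0]; exact mb_ge _ j hbj
        have hjk1 : j ≤ k1 := r3 j hjk0 hbj hcj'
        by_cases hm : w.getD k1 default = c
        · rw [if_pos hm]; omega
        · rcases r2 with hz | hmm
          · have hj0 : j = 0 := by omega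
            rw [hj0, ← hz] at hcj'
            exact absurd hcj' hm
          · exact absurd hmm hm
  simp only [kmpStep]
  rw [← hc, ← hk1, hkey]

theorem getD_map_range (f : Nat → Nat) (n t : Nat) (h : t < n) :
    ((List.range n).map f).getD t 0 = f t := by
  rw [List.getD_eq_getElem _ 0 (by simpa using h)]
  simp

theorem fold_spec (w : List Char) (m : Nat) (hm : m + 1 ≤ w.length) :
    (List.range' 1 m).foldl (kmpStep w) [0] =
      (List.range (m+1)).map (fun t => mb (w.take (t+1))) := by
  induction m with
  | zero =>
    have h1 : mb (w.take 1) = 0 := by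
      have : (w.take 1).length = 1 := by simp; omega
      have := mb_le (w.take 1)
      omega
    simp [List.range_succ, h1]
  | succ m ih =>
    have hm' : m + 1 ≤ w.length := by omega
    rw [List.range'_1_concat, List.foldl_append]
    simp only [List.foldl_cons, List.foldl_nil]
    rw [ih hm']
    rw [step_spec w _ (1+m) (by omega) (by omega) ?_]
    · have h1m : 1 + m = m + 1 := by omega
      rw [h1m]
      simp [List.range_succ]
    · intro t ht
      exact getD_map_range _ _ t (by omega)

-- A's inner loop decides whether length i+1 is a border
theorem aInner_iff (w : List Char) (i : Nat) (hi : i < w.length - 1) :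
    (aInner w i = true ↔ isBorder w (i+1)) := by
  have hl : i + 1 < w.length := by omega
  have hlt : (w.take (i+1)).length = i + 1 := by simp; omega
  have hld : (w.drop (w.length - (i+1))).length = i + 1 := by simp; omega
  simp only [aInner, List.all_eq_true, List.mem_range, beq_iff_eq]
  constructor
  · intro h
    refine ⟨hl, ?_⟩
    apply List.ext_getElem (by rw [hlt, hld])
    intro j hj1 hj2
    rw [hlt] at hj1
    have hjw : j < w.length := by omega
    have hjw2 : w.length - (i+1) + j < w.length := by omega
    have := h j hj1
    rw [List.getD_eq_getElem w default hjw, List.getD_eq_getElem w default hjw2] at this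
    simpa [List.getElem_take, List.getElem_drop] using this
  · rintro ⟨_, he⟩ j hj
    have hjw : j < w.length := by omega
    have hjw2 : w.length - (i+1) + j < w.length := by omega
    rw [List.getD_eq_getElem w default hjw, List.getD_eq_getElem w default hjw2]
    have h1 : (w.take (i+1))[j]'(by omega) = w[j] := by simp [List.getElem_take]
    have h2 : (w.drop (w.length - (i+1)))[j]'(by omega) = w[w.length - (i+1) + j] := by
      simp [List.getElem_drop]
    rw [← h1, ← h2]
    congr 1

theorem aOuter_true_iff (w : List Char) (L : List Nat) :
    (aOuter w L = true ↔ ∀ i ∈ L, aInner w i = false) := by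
  induction L with
  | nil => simp [aOuter]
  | cons i rest ih =>
    simp only [aOuter]
    by_cases h : aInner w i = true
    · simp [h]
    · simp only [if_neg h]
      rw [ih]
      simp only [List.mem_cons]
      constructor
      · rintro hall j (rfl | hj)
        · simpa using h
        · exact hall j hj
      · intro hall j hj
        exact hall j (Or.inr hj)

theorem mb_zero_iff (w : List Char) :
    (mb w = 0 ↔ ∀ k, 0 < k → ¬ isBorder w k) := by
  constructor
  · intro h0 k hk hb
    have := mb_ge w k hb
    omega
  · intro h
    by_contra hne
    have hwne : w ≠ [] := by
      intro hnil
      rw [hnil] at hne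
      simp [mb] at hne
    have := mb_border w hwne
    exact h (mb w) (by omega) this

-- A computes decide (mb w = 0)
theorem a_eq (w : List Char) :
    aOuter w (List.range (w.length - 1)) = decide (mb w = 0) := by
  rw [Bool.eq_iff_iff]
  rw [aOuter_true_iff, decide_eq_true_eq, mb_zero_iff]
  constructor
  · intro h k hk hb
    have hkl : k < w.length := hb.1
    have hk1 := h (k-1) (by rw [List.mem_range]; omega)
    have hks : k - 1 + 1 = k := by omega
    have hiff := aInner_iff w (k-1) (by omega)
    rw [hks] at hiff
    exact absurd (hiff.mpr hb) (by simp [hk1])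
  · intro h i hi
    rw [List.mem_range] at hi
    have hiff := aInner_iff w i (by omega)
    cases haI : aInner w i
    · rfl
    · exact absurd (hiff.mp haI) (h (i+1) (by omega))

-- B computes decide (mb w = 0)
theorem b_eq (w : List Char) :
    (if w.length < 2 then true
     else decide (((List.range' 1 (w.length-1)).foldl (kmpStep w) [0]).getD (w.length-1) 0 = 0))
      = decide (mb w = 0) := by
  by_cases hn : w.length < 2
  · rw [if_pos hn]
    have : mb w = 0 := by
      have := mb_le w
      omega
    simp [this]
  · rw [if_neg hn]
    push_neg at hn
    have hfold := fold_spec w (w.length - 1) (by omega)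
    rw [hfold]
    have := getD_map_range (fun t => mb (w.take (t+1))) (w.length - 1 + 1) (w.length - 1)
        (by omega)
    rw [this]
    have h2 : w.length - 1 + 1 = w.length := by omega
    simp only [h2, List.take_length]

-- ===== VERDICT (by name: the statement is the Claim_ definition above) =====
theorem overlapFreeP_spec : Claim_equal_overlapFreeP := by
  intro word _
  unfold Spec_overlapFreeP
  show aOuter word.toList (List.range (word.toList.length - 1)) =
    (if word.toList.length < 2 then true
     else decide (((List.range' 1 (word.toList.length-1)).foldl (kmpStep word.toList) [0]).getD
        (word.toList.length-1) 0 = 0))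
  rw [a_eq, b_eq]
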